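-- pv_equiv track=rewrite | github.com/Afdal-B/Frequent-Itemset-Mining | FIM.py | get_items
-- ===== SOURCE A (Python) =====
-- def get_items(dataset):
--     # We initialize the list to return
--     result = []
--     for transaction in dataset:
--         for item in transaction:
--             if (item not in result):
--                 result.append(item)
--     # We sort our list
--     result.sort()
--     # We transform each item in a set of one item
--     i = 0
--     for item in result:
--         result[i] = {item}
--         i += 1
--     return result
-- ===== SOURCE B (Python) =====
-- def get_items(dataset):
--     # Flatten, sort, then adjacent-dedup in one pass; emit singleton sets.
--     flat = []
--     for transaction in dataset:
--         flat.extend(transaction)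
--     flat.sort()
--     result = []
--     prev = None
--     for item in flat:
--         if prev is None or item != prev:
--             result.append({item})
--         prev = item
--     return result
-- ===== Notes on version B (the rewrite author's own statement) =====
-- stated objective: faster
-- what changed: Replaces A's dedup loop with a linear membership scan per item (then sort) by flatten-then-sort-then-one-pass adjacent dedup tracking the previous element, emitting singleton sets on the fly.
import Mathlib
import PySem

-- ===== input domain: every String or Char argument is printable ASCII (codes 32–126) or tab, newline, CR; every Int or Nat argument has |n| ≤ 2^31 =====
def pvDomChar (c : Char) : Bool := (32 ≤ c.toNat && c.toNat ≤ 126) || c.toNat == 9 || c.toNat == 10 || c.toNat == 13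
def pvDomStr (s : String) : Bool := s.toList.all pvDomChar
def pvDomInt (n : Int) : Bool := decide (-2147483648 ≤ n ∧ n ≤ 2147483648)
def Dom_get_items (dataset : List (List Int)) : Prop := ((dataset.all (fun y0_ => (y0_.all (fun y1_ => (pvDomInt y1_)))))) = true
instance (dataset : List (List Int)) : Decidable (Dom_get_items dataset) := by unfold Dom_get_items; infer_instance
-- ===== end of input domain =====

-- B flattens, sorts once, then removes adjacent duplicates in a single pass (no membership scans).

-- ===== PORT A =====
def get_items (dataset : List (List Int)) : List (List Int) :=
  -- result = []; for transaction in dataset: for item in transaction: if item not in result: result.append(item)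
  let result := dataset.foldl
    (fun acc transaction => transaction.foldl
      (fun acc item => if item ∈ acc then acc else acc ++ [item]) acc) []
  -- result.sort()
  let result := PySem.List.sorted result (fun x => x) false
  -- for item in result: result[i] = {item}  (each singleton set ports to a one-element list)
  result.map (fun item => [item])

-- ===== PORT B =====
def get_items_alt (dataset : List (List Int)) : List (List Int) :=
  -- flat = []; for transaction in dataset: flat.extend(transaction)
  let flat := dataset.foldl (fun acc transaction => acc ++ transaction) []
  -- flat.sort()
  let flat := PySem.List.sorted flat (fun x => x) false
  -- result = []; prev = None; for item in flat: if prev is None or item != prev: result.append({item}); prev = item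
  (flat.foldl
    (fun (st : List (List Int) × Option Int) item =>
      (if st.2 = none ∨ st.2 ≠ some item then st.1 ++ [[item]] else st.1, some item))
    ([], none)).1

-- ===== PRECONDITION & SPEC =====
def Spec_get_items (dataset : List (List Int)) (out : List (List Int)) : Prop := out = get_items_alt dataset
instance (dataset : List (List Int)) (out : List (List Int)) : Decidable (Spec_get_items dataset out) := by unfold Spec_get_items; infer_instance

-- ===== CLAIM (what is proved, stated in full; the proofs are below) =====
def Claim_equal_get_items : Prop := ∀ (dataset : List (List Int)), Dom_get_items dataset → Spec_get_items dataset (get_items dataset)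

-- ===== LEMMAS AND PROOFS =====

-- adjacent dedup of the remaining list, given the previous kept element
def pvGo (p : Int) : List Int → List Int
  | [] => []
  | y :: ys => if y = p then pvGo p ys else y :: pvGo y ys

-- B's fold, once the first element has been emitted, appends the singletons of pvGo
theorem pvFold_go (l : List Int) (res : List (List Int)) (p : Int) :
    (l.foldl
      (fun (st : List (List Int) × Option Int) item =>
        (if st.2 = none ∨ st.2 ≠ some item then st.1 ++ [[item]] else st.1, some item))
      (res, some p)).1 = res ++ (pvGo p l).map (fun x => [x]) := by
  induction l generalizing res p with
  | nil => simp [pvGo]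
  | cons y ys ih =>
    by_cases h : y = p
    · simp [pvGo, h, List.foldl_cons, ih]
    · have h' : ¬ p = y := fun e => h e.symm
      simp [pvGo, h, h', List.foldl_cons, ih]

theorem pvMem_go (p : Int) (l : List Int) (hs : l.Pairwise (· ≤ ·)) (hp : ∀ z ∈ l, p ≤ z) :
    ∀ y, y ∈ pvGo p l ↔ (y ∈ l ∧ y ≠ p) := by
  induction l generalizing p with
  | nil => simp [pvGo]
  | cons x xs ih =>
    intro y
    rcases List.pairwise_cons.1 hs with ⟨hx, hxs⟩
    by_cases h : x = p
    · subst h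
      rw [pvGo, if_pos rfl, ih x hxs hx y]
      constructor
      · rintro ⟨hy, hne⟩; exact ⟨List.mem_cons_of_mem _ hy, hne⟩
      · rintro ⟨hy, hne⟩
        rcases List.mem_cons.1 hy with rfl | hy
        · exact absurd rfl hne
        · exact ⟨hy, hne⟩
    · rw [pvGo, if_neg h, List.mem_cons, ih x hxs hx y, List.mem_cons]
      constructor
      · rintro (rfl | ⟨hy, hne⟩)
        · exact ⟨Or.inl rfl, h⟩
        · refine ⟨Or.inr hy, fun hyp => ?_⟩
          subst hyp
          exact h (le_antisymm (hx y hy) (hp x (List.mem_cons_self)))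
      · rintro ⟨rfl | hy, hne⟩
        · exact Or.inl rfl
        · by_cases hxy : y = x
          · exact Or.inl hxy
          · exact Or.inr ⟨hy, hxy⟩

theorem pvPairwise_go (p : Int) (l : List Int) (hs : l.Pairwise (· ≤ ·)) (hp : ∀ z ∈ l, p ≤ z) :
    (p :: pvGo p l).Pairwise (· < ·) := by
  induction l generalizing p with
  | nil => simp [pvGo]
  | cons x xs ih =>
    rcases List.pairwise_cons.1 hs with ⟨hx, hxs⟩
    by_cases h : x = p
    · subst h
      rw [pvGo, if_pos rfl]
      exact ih x hxs hx
    · rw [pvGo, if_neg h]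
      have hpx : p < x := lt_of_le_of_ne (hp x (List.mem_cons_self)) (fun e => h e.symm)
      have hrec := ih x hxs hx
      refine List.pairwise_cons.2 ⟨?_, hrec⟩
      intro z hz
      rcases List.mem_cons.1 hz with rfl | hz
      · exact hpx
      · have hz' := (pvMem_go x xs hxs hx z).1 hz
        exact lt_of_lt_of_le hpx (hx z hz'.1)

-- A's dedup loop over the flattened list: nodup, and membership is membership in the input
theorem pvLoopA_spec (F : List Int) (acc : List Int) (hacc : acc.Nodup) :
    (F.foldl (fun acc item => if item ∈ acc then acc else acc ++ [item]) acc).Nodup ∧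
    ∀ y, y ∈ F.foldl (fun acc item => if item ∈ acc then acc else acc ++ [item]) acc ↔
      (y ∈ acc ∨ y ∈ F) := by
  induction F generalizing acc with
  | nil => simpa using hacc
  | cons x xs ih =>
    by_cases h : x ∈ acc
    · have := ih acc hacc
      rw [List.foldl_cons, if_pos h]
      refine ⟨this.1, fun y => ?_⟩
      rw [this.2 y, List.mem_cons]
      constructor
      · rintro (hy | hy); exacts [Or.inl hy, Or.inr (Or.inr hy)]
      · rintro (hy | rfl | hy); exacts [Or.inl hy, Or.inl h, Or.inr hy]
    · have hacc' : (acc ++ [x]).Nodup := by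
        simp [List.nodup_append, hacc]
        exact fun a ha e => h (e ▸ ha)
      have := ih (acc ++ [x]) hacc'
      rw [List.foldl_cons, if_neg h]
      refine ⟨this.1, fun y => ?_⟩
      rw [this.2 y]
      simp only [List.mem_append, List.mem_cons]
      tauto

theorem pvFoldAppend (l : List (List Int)) (acc : List Int) :
    l.foldl (fun a t => a ++ t) acc = acc ++ l.flatten := by
  induction l generalizing acc with
  | nil => simp
  | cons t ts ih => simp [List.foldl_cons, ih]

-- ===== VERDICT (by name: the statement is the Claim_ definition above) =====
theorem get_items_spec : Claim_equal_get_items := by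
  intro dataset _
  unfold Spec_get_items get_items get_items_alt
  dsimp only
  have hflat : dataset.foldl (fun a t => a ++ t) [] = dataset.flatten := by
    simpa using pvFoldAppend dataset []
  have hnest : dataset.foldl
      (fun acc transaction => transaction.foldl
        (fun acc item => if item ∈ acc then acc else acc ++ [item]) acc) [] =
      dataset.flatten.foldl (fun acc item => if item ∈ acc then acc else acc ++ [item]) [] :=
    Eq.symm List.foldl_flatten
  set F := dataset.flatten with hF
  set L := F.foldl (fun acc item => if item ∈ acc then acc else acc ++ [item]) [] with hL
  rw [hnest, hflat]
  have hLspec := pvLoopA_spec F [] (by simp)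
  -- case on the sorted flattened list
  rcases hS : PySem.List.sorted F (fun x => x) false with _ | ⟨s, rest⟩
  · -- F = [], hence L = []
    have hFnil : F = [] := (PySem.List.sorted_eq_nil_iff F (fun x => x) false).1 hS
    have hLnil : L = [] := by rw [hL, hFnil]; rfl
    have : PySem.List.sorted L (fun x => x) false = [] :=
      (PySem.List.sorted_eq_nil_iff L (fun x => x) false).2 hLnil
    rw [this]
    rfl
  · -- B's fold: first element emitted, then pvFold_go
    have hpw : (s :: rest).Pairwise (fun a b => a ≤ b) := by
      have := PySem.List.sorted_pairwise F (fun x => x)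
      rw [hS] at this
      exact this
    rcases List.pairwise_cons.1 hpw with ⟨hsrest, hrest⟩
    have hB : ((s :: rest).foldl
        (fun (st : List (List Int) × Option Int) item =>
          (if st.2 = none ∨ st.2 ≠ some item then st.1 ++ [[item]] else st.1, some item))
        ([], none)).1 = (s :: pvGo s rest).map (fun x => [x]) := by
      rw [List.foldl_cons]
      simp only [reduceCtorEq, ne_eq, true_or, if_pos]
      rw [pvFold_go]
      simp
    rw [hB]
    -- A's sorted dedup list equals s :: pvGo s rest
    have hperm : (s :: pvGo s rest).Perm L := by
      apply (List.perm_ext_iff_of_nodup ?_ hLspec.1).2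
      · intro y
        rw [hLspec.2 y]
        have hmemS : y ∈ s :: rest ↔ y ∈ F := by
          rw [← hS]; exact PySem.List.mem_sorted F (fun x => x) false y
        rw [List.mem_cons, pvMem_go s rest hrest hsrest y]
        constructor
        · rintro (rfl | ⟨hy, _⟩)
          · exact Or.inr (hmemS.1 (List.mem_cons_self))
          · exact Or.inr (hmemS.1 (List.mem_cons_of_mem _ hy))
        · rintro (hy | hy)
          · simp at hy
          · rcases List.mem_cons.1 (hmemS.2 hy) with rfl | hy'
            · exact Or.inl rfl
            · by_cases hys : y = s
              · exact Or.inl hys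
              · exact Or.inr ⟨hy', hys⟩
      · exact ((pvPairwise_go s rest hrest hsrest).imp (fun h => ne_of_lt h))
    have hsorted : PySem.List.sorted L (fun x => x) false = s :: pvGo s rest :=
      PySem.List.sorted_eq_of_perm_of_pairwise_lt L (s :: pvGo s rest) (fun x => x) hperm
        (pvPairwise_go s rest hrest hsrest)
    rw [hsorted]
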